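-- pv_equiv track=rewrite | github.com/gprajwalpoojari/Autonomous-Parking-using-A-Star-Search | Car Pulling Trailer/world.py | make_end_point_pairs
-- ===== SOURCE A (Python) =====
-- def make_end_point_pairs(points):
--     lines = []
--     for j in range(len(points)):
--         line = []
--         line.append(points[j])
--         if (j == len(points) - 1):
--             line.append(points[0])
--         else:
--             line.append(points[j + 1])
--         lines.append(line)
--     return lines
-- ===== SOURCE B (Python) =====
-- def make_end_point_pairs(points):
--     shifted = points[1:] + points[:1]
--     return [[a, b] for a, b in zip(points, shifted)]
-- ===== Notes on version B (the rewrite author's own statement) =====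
-- stated objective: simpler
-- what changed: Replaces the index loop with its last-element wraparound branch by a precomputed cyclically rotated copy zipped elementwise against the original.
import Mathlib
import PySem

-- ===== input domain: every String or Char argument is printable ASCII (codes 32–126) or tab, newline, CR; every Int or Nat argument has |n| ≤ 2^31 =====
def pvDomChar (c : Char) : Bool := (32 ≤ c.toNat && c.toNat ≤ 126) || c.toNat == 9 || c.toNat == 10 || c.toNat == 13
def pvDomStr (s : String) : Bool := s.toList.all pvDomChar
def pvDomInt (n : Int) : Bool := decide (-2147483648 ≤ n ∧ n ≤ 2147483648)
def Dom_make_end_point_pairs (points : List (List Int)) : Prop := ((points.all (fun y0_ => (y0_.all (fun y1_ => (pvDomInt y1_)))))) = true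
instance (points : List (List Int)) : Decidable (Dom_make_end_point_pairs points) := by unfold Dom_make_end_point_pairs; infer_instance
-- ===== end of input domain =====

-- B replaces the index loop with its wraparound branch by zipping the list against its rotation by one; objective: simpler.


-- ===== PORT A =====
-- Literal port of A: loop j over range(len(points)); indices j, j+1, 0 are always in range,
-- so points[·] is ported as pyGetD with default [] (never hit).
def make_end_point_pairs (points : List (List Int)) : List (List (List Int)) :=
  (PySem.List.pyRange 0 (points.length : Int) 1).foldl
    (fun lines j =>
      lines ++ [[PySem.List.pyGetD points j [],
                 if j = (points.length : Int) - 1 then PySem.List.pyGetD points 0 []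
                 else PySem.List.pyGetD points (j + 1) []]])
    []

-- ===== PORT B =====
-- Port of B: zip the list against its rotation by one.
def make_end_point_pairs_alt (points : List (List Int)) : List (List (List Int)) :=
  List.zipWith (fun a b => [a, b]) points (points.drop 1 ++ points.take 1)

-- ===== PRECONDITION & SPEC =====
def Spec_make_end_point_pairs (points : List (List Int)) (out : List (List (List Int))) : Prop := out = make_end_point_pairs_alt points
instance (points : List (List Int)) (out : List (List (List Int))) : Decidable (Spec_make_end_point_pairs points out) := by unfold Spec_make_end_point_pairs; infer_instance

-- ===== CLAIM (what is proved, stated in full; the proofs are below) =====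
def Claim_equal_make_end_point_pairs : Prop := ∀ (points : List (List Int)), Dom_make_end_point_pairs points → Spec_make_end_point_pairs points (make_end_point_pairs points)

-- ===== LEMMAS AND PROOFS =====

-- ===== VERDICT (by name: the statement is the Claim_ definition above) =====
theorem make_end_point_pairs_spec : Claim_equal_make_end_point_pairs := by
  intro points _
  unfold Spec_make_end_point_pairs make_end_point_pairs make_end_point_pairs_alt
  rw [PySem.List.foldl_append_singleton_eq_map]
  apply List.ext_getElem
  · simp [PySem.List.length_pyRange_one]; omega
  · intro k hk1 hk2
    simp only [List.nil_append] at hk1 ⊢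
    have hk : k < points.length := by
      simpa [PySem.List.length_pyRange_one] using hk1
    rw [List.getElem_map, PySem.List.getElem_pyRange_one]
    have hget : ∀ (m : Nat) (hm : m < points.length),
        PySem.List.pyGetD points (m : Int) [] = points[m]'hm := by
      intro m hm
      rw [PySem.List.pyGetD_natCast]
      simp [hm]
    rw [List.getElem_zipWith]
    by_cases hlast : k = points.length - 1
    · have hne : points.length ≠ 0 := by omega
      have : ((0 : Int) + k) = (points.length : Int) - 1 := by
        subst hlast; omega
      rw [if_pos this]
      have h0 : 0 < points.length := by omega
      have h00 : PySem.List.pyGetD points (0 : Int) [] = points[0]'h0 := by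
        simpa using hget 0 h0
      rw [zero_add, hget k hk, h00]
      congr 1
      · congr 1
        rw [List.getElem_append_right (by simp; omega)]
        simp only [List.getElem_take]
        congr 1
        simp
        omega
    · have : ((0 : Int) + k) ≠ (points.length : Int) - 1 := by omega
      rw [if_neg this]
      have hk1' : k + 1 < points.length := by omega
      rw [zero_add]
      have : ((k : Int) + 1) = ((k + 1 : Nat) : Int) := by push_cast; ring
      rw [this, hget k hk, hget (k+1) hk1']
      congr 1
      congr 1
      rw [List.getElem_append_left (by simp; omega)]
      simp
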